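-- pv_equiv track=rewrite | github.com/jaki2012/SoftwareMetricsAnalyse | LOCAnalyse.py | define_row
-- ===== SOURCE A (Python) =====
-- def define_row(row):
--     row = row.strip("\n\r\t   ")
--     if len(row) == 1:
--         return "Code";
--     elif len(row) >= 2 and row[0] == '/' and row[1] == '/':
--         return "Comment";
--     elif len(row) >= 2 and row[0] == '/' and row[1] == '*':
--         if row.rfind("*/") == -1:
--             return "CommentNotEnd";
--         elif row.rfind("*/") == len(row) - 2:
--             return "CommentEnd";
--         elif row.rfind("*/") < len(row) - 2:
--             return "Comment_" + define_row(row[row.rfind("*/")+2:len(row)]);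
--     elif row.rfind(';') == len(row) - 1 and row.count(';') == 1:
--         return "Code";
--     elif row.rfind(';') == len(row) - 1 and row.count(';') > 1:
--         return "Code_"+define_row(row[row.find(';')+1:len(row)])
--     elif row.rfind(";")!= -1 and row.rfind(";") < len(row) - 1:
--         return "Code_" + define_row(row[row.rfind(";")+1:len(row)]);
--     elif row.rfind(';') == -1:
--         if row.rfind("/*") == -1:
--             return "Code";
--         else:
--             return "Code_" + define_row(row[row.rfind("/*")+2:len(row)]);
--     elif row[0] == '*':
--             return "Comment";
--     else:
--         return "Unknown";
-- ===== SOURCE B (Python) =====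
-- def _classify(row):
--     # classify one stripped line: returns (label, rest); rest is None when the line is final
--     if len(row) == 1:
--         return ("Code", None)
--     if row.startswith("//"):
--         return ("Comment", None)
--     if row.startswith("/*"):
--         k = row.rfind("*/")
--         if k == -1:
--             return ("CommentNotEnd", None)
--         if k == len(row) - 2:
--             return ("CommentEnd", None)
--         return ("Comment", row[k + 2:])
--     if row.endswith(";"):
--         if row.count(";") == 1:
--             return ("Code", None)
--         return ("Code", row[row.find(";") + 1:])
--     k = row.rfind(";")
--     if k != -1:
--         return ("Code", row[k + 1:])
--     j = row.rfind("/*")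
--     if j == -1:
--         return ("Code", None)
--     return ("Code", row[j + 2:])
--
--
-- def define_row(row):
--     labels = []
--     rest = row
--     while rest is not None:
--         label, rest = _classify(rest.strip("\n\r\t   "))
--         labels.append(label)
--     return "_".join(labels)
-- ===== Notes on version B (the rewrite author's own statement) =====
-- stated objective: alternative
-- what changed: Replaces A's self-recursive classifier (which glues the label plus separator onto each recursive result) by a staged design: a pure single-step classifier returning (label, optional remainder), a driver loop that collects one label per step into a list, and a final join with the separator; branch tests use startswith/endswith idioms and A's unreachable trailing branches are dropped.
import Mathlib
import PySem

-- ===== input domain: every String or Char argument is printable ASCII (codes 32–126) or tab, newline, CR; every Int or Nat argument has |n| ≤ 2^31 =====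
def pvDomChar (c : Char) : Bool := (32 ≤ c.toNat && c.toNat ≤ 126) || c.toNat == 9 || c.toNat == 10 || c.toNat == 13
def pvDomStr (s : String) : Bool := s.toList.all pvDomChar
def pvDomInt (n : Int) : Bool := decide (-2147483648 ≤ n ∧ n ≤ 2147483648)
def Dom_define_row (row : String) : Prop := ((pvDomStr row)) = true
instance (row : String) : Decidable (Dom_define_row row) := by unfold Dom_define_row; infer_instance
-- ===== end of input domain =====

-- B splits the task into a single-step classifier returning (label, optional remainder),
-- a driver loop that collects the labels of all steps into a list, and a final separator join;
-- A instead recurses, gluing "Label_" onto each recursive result. Same return value.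

-- shared helper: the character set of Python's strip("\n\r\t   ")
def pvStripSet : List Char := ['\n', '\r', '\t', ' ']

-- ===== PORT A =====
-- literal transliteration of A's recursion; fuel (length + 1) only makes the recursion
-- structural — it never runs out, since every recursive call is on a strictly shorter list
def defineRowA : Nat → List Char → String
  | 0, _ => ""
  | fuel+1, row =>
    let r := PySem.Chars.stripChars row pvStripSet
    let n : Int := (r.length : Int)
    if r.length = 1 then "Code"
    else if 2 ≤ r.length ∧ PySem.List.pyGet? r 0 = some '/' ∧ PySem.List.pyGet? r 1 = some '/' then "Comment"
    else if 2 ≤ r.length ∧ PySem.List.pyGet? r 0 = some '/' ∧ PySem.List.pyGet? r 1 = some '*' then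
      (if PySem.Chars.rfind r ['*','/'] = -1 then "CommentNotEnd"
       else if PySem.Chars.rfind r ['*','/'] = n - 2 then "CommentEnd"
       else if PySem.Chars.rfind r ['*','/'] < n - 2 then
         "Comment_" ++ defineRowA fuel (PySem.List.slice r (some (PySem.Chars.rfind r ['*','/'] + 2)) (some n))
       else "")  -- Python's implicit fall-through; unreachable (rfind "*/" is at most len-2)
    else if PySem.Chars.rfind r [';'] = n - 1 ∧ PySem.Chars.count r [';'] = 1 then "Code"
    else if PySem.Chars.rfind r [';'] = n - 1 ∧ 1 < PySem.Chars.count r [';'] then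
      "Code_" ++ defineRowA fuel (PySem.List.slice r (some (PySem.Chars.find r [';'] + 1)) (some n))
    else if PySem.Chars.rfind r [';'] ≠ -1 ∧ PySem.Chars.rfind r [';'] < n - 1 then
      "Code_" ++ defineRowA fuel (PySem.List.slice r (some (PySem.Chars.rfind r [';'] + 1)) (some n))
    else if PySem.Chars.rfind r [';'] = -1 then
      (if PySem.Chars.rfind r ['/','*'] = -1 then "Code"
       else "Code_" ++ defineRowA fuel (PySem.List.slice r (some (PySem.Chars.rfind r ['/','*'] + 2)) (some n)))
    else if PySem.List.pyGet? r 0 = some '*' then "Comment"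
    else "Unknown"

def define_row (row : String) : String := defineRowA (row.toList.length + 1) row.toList

-- ===== PORT B =====
-- literal transliteration of Source B's `_classify`: one stripped line ↦ (label, optional remainder)
def pvClassify (r : List Char) : String × Option (List Char) :=
  let n : Int := (r.length : Int)
  if r.length = 1 then ("Code", none)
  else if PySem.Chars.startswith r ['/', '/'] then ("Comment", none)
  else if PySem.Chars.startswith r ['/', '*'] then
    let k := PySem.Chars.rfind r ['*','/']
    if k = -1 then ("CommentNotEnd", none)
    else if k = n - 2 then ("CommentEnd", none)
    else ("Comment", some (PySem.List.slice r (some (k + 2)) none))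
  else if PySem.Chars.endswith r [';'] then
    (if PySem.Chars.count r [';'] = 1 then ("Code", none)
     else ("Code", some (PySem.List.slice r (some (PySem.Chars.find r [';'] + 1)) none)))
  else
    let k := PySem.Chars.rfind r [';']
    if k ≠ -1 then ("Code", some (PySem.List.slice r (some (k + 1)) none))
    else
      let j := PySem.Chars.rfind r ['/','*']
      if j = -1 then ("Code", none)
      else ("Code", some (PySem.List.slice r (some (j + 2)) none))

-- Source B's while-loop, collecting the label of each step (fuel is the usual structural bound)
def pvLabels : Nat → List Char → List String
  | 0, _ => [""]
  | fuel+1, rest =>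
    match pvClassify (PySem.Chars.stripChars rest pvStripSet) with
    | (label, none) => [label]
    | (label, some rest') => label :: pvLabels fuel rest'

def define_row_alt (row : String) : String :=
  PySem.Str.join "_" (pvLabels (row.toList.length + 1) row.toList)

-- ===== PRECONDITION & SPEC =====
def Spec_define_row (row : String) (out : String) : Prop := out = define_row_alt row
instance (row : String) (out : String) : Decidable (Spec_define_row row out) := by unfold Spec_define_row; infer_instance

-- ===== CLAIM (what is proved, stated in full; the proofs are below) =====
def Claim_equal_define_row : Prop := ∀ (row : String), Dom_define_row row → Spec_define_row row (define_row row)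

-- ===== LEMMAS AND PROOFS =====

-- rfind.go returns -1 or a found position ≤ its start index
theorem pv_rfind_go_cases (s sub : List Char) (j : Nat) :
    PySem.Chars.rfind.go s sub j = -1 ∨
      ∃ i : Nat, i ≤ j ∧ PySem.Chars.rfind.go s sub j = (i : Int) ∧ sub.isPrefixOf (s.drop i) = true := by
  induction j with
  | zero =>
    by_cases h : sub.isPrefixOf s = true
    · exact Or.inr ⟨0, le_refl _, by simp [PySem.Chars.rfind.go, h], by simpa using h⟩
    · exact Or.inl (by simp [PySem.Chars.rfind.go, h])
  | succ j ih =>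
    by_cases h : sub.isPrefixOf (s.drop (j+1)) = true
    · exact Or.inr ⟨j+1, le_refl _, by simp [PySem.Chars.rfind.go, h], h⟩
    · have hg : PySem.Chars.rfind.go s sub (j+1) = PySem.Chars.rfind.go s sub j := by
        simp [PySem.Chars.rfind.go, h]
      rcases ih with h1 | ⟨i, hi, he, hp⟩
      · exact Or.inl (hg.trans h1)
      · exact Or.inr ⟨i, Nat.le_succ_of_le hi, hg.trans he, hp⟩

-- if an occurrence exists at i ≤ j, rfind.go finds one at some i' ≥ i
theorem pv_rfind_go_ge (s sub : List Char) (j i : Nat) (hij : i ≤ j)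
    (hp : sub.isPrefixOf (s.drop i) = true) :
    ∃ i' : Nat, i ≤ i' ∧ PySem.Chars.rfind.go s sub j = (i' : Int) ∧ sub.isPrefixOf (s.drop i') = true := by
  induction j with
  | zero =>
    have : i = 0 := Nat.le_zero.mp hij
    subst this
    have hp0 : sub.isPrefixOf s = true := by simpa using hp
    exact ⟨0, le_refl _, by simp [PySem.Chars.rfind.go, hp0], hp⟩
  | succ j ih =>
    by_cases h : sub.isPrefixOf (s.drop (j+1)) = true
    · exact ⟨j+1, hij, by simp [PySem.Chars.rfind.go, h], h⟩
    · have hij' : i ≤ j := by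
        rcases Nat.lt_or_ge i (j+1) with h' | h'
        · omega
        · exfalso; have hi1 : i = j+1 := by omega
          rw [hi1] at hp; exact h hp
      obtain ⟨i', h1, h2, h3⟩ := ih hij'
      exact ⟨i', h1, by simp [PySem.Chars.rfind.go, h]; exact h2, h3⟩

-- a found position of a nonempty pattern satisfies 0 ≤ k and k + |sub| ≤ |s|
theorem pv_rfind_bound (s sub : List Char) (hsub : sub ≠ [])
    (h : PySem.Chars.rfind s sub ≠ -1) :
    ∃ i : Nat, PySem.Chars.rfind s sub = (i : Int) ∧ i + sub.length ≤ s.length := by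
  rcases pv_rfind_go_cases s sub s.length with h1 | ⟨i, hi, he, hp⟩
  · exact absurd h1 h
  · refine ⟨i, he, ?_⟩
    have hle := List.IsPrefix.length_le (List.isPrefixOf_iff_prefix.mp hp)
    have hd : (s.drop i).length = s.length - i := by simp
    have hpos : 0 < sub.length := List.length_pos_iff.mpr hsub
    omega

-- endswith by a single char ↔ rfind of that char is len - 1  (nonempty list)
theorem pv_endswith_iff_rfind (r : List Char) (c : Char) (h : r ≠ []) :
    PySem.Chars.endswith r [c] = true ↔ PySem.Chars.rfind r [c] = (r.length : Int) - 1 := by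
  have hlen : 1 ≤ r.length := List.length_pos_iff.mpr h
  constructor
  · intro he
    have hs : [c] <:+ r := List.isSuffixOf_iff_suffix.mp (by simpa [PySem.Chars.endswith] using he)
    obtain ⟨t, ht⟩ := hs
    have htl : t.length + 1 = r.length := by
      have := congrArg List.length ht; simpa using this
    have hp : [c].isPrefixOf (r.drop (r.length - 1)) = true := by
      rw [List.isPrefixOf_iff_prefix]
      have : r.drop (r.length - 1) = [c] := by
        rw [← ht]; simp
      rw [this]
    obtain ⟨i', h1, h2, h3⟩ := pv_rfind_go_ge r [c] r.length (r.length - 1) (by omega) hp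
    have hb := List.IsPrefix.length_le (List.isPrefixOf_iff_prefix.mp h3)
    have hd : (r.drop i').length = r.length - i' := by simp
    have : i' = r.length - 1 := by simp at hb hd; omega
    subst this
    unfold PySem.Chars.rfind
    rw [h2]
    omega
  · intro he
    rcases pv_rfind_go_cases r [c] r.length with h1 | ⟨i, hi, h2, hp⟩
    · unfold PySem.Chars.rfind at he; rw [h1] at he; omega
    · unfold PySem.Chars.rfind at he; rw [h2] at he
      have : i = r.length - 1 := by omega
      subst this
      have hpfx : [c] <+: r.drop (r.length - 1) := List.isPrefixOf_iff_prefix.mp hp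
      have hd : (r.drop (r.length - 1)).length = 1 := by simp; omega
      have : r.drop (r.length - 1) = [c] := by
        obtain ⟨t, ht⟩ := hpfx
        have := congrArg List.length ht
        simp [hd] at this
        simp [this] at ht
        exact ht.symm
      simp only [PySem.Chars.endswith]
      rw [List.isSuffixOf_iff_suffix]
      exact ⟨r.take (r.length - 1), by rw [← this]; simp⟩

-- count of a single-char pattern is List.count
theorem pv_count_go_single (c : Char) (l : List Char) (fuel acc : Nat) (hf : l.length ≤ fuel) :
    PySem.Chars.count.go [c] fuel l acc = acc + l.count c := by
  induction l generalizing fuel acc with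
  | nil => cases fuel <;> simp [PySem.Chars.count.go]
  | cons x t ih =>
    cases fuel with
    | zero => simp at hf
    | succ fuel =>
      have hf' : t.length ≤ fuel := by simp at hf; omega
      have hpre : List.isPrefixOf [c] (x :: t) = (c == x) := by simp [List.isPrefixOf]
      by_cases hx : c = x
      · subst hx
        simp [PySem.Chars.count.go, hpre, ih fuel (acc+1) hf']
        omega
      · simp [PySem.Chars.count.go, hpre, hx, ih fuel acc hf', Ne.symm hx]

theorem pv_count_single (r : List Char) (c : Char) :
    PySem.Chars.count r [c] = r.count c := by
  unfold PySem.Chars.count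
  simp [pv_count_go_single c r r.length 0 (le_refl _)]

-- startswith by a two-char pattern ↔ length ≥ 2 and those two leading chars
theorem pv_startswith_pair (r : List Char) (a b : Char) :
    PySem.Chars.startswith r [a, b] = true ↔
      2 ≤ r.length ∧ PySem.List.pyGet? r 0 = some a ∧ PySem.List.pyGet? r 1 = some b := by
  match r with
  | [] => simp [PySem.Chars.startswith, List.isPrefixOf, PySem.List.pyGet?, PySem.List.pyIdx?]
  | [x] => simp [PySem.Chars.startswith, List.isPrefixOf, PySem.List.pyGet?, PySem.List.pyIdx?]
  | x :: y :: t =>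
    have g0 : PySem.List.pyGet? (x::y::t) 0 = some x := by
      simpa using PySem.List.pyGet?_natCast (x::y::t) 0
    have g1 : PySem.List.pyGet? (x::y::t) 1 = some y := by
      simpa using PySem.List.pyGet?_natCast (x::y::t) 1
    simp [PySem.Chars.startswith, List.isPrefixOf, g0]
    constructor
    · rintro ⟨rfl, rfl⟩; simp
    · rintro ⟨h1, h2⟩; simp_all

-- an omitted slice end is the same as slicing to the length
theorem pv_slice_none (r : List Char) (a : Int) :
    PySem.List.slice r (some a) none = PySem.List.slice r (some a) (some (r.length : Int)) := by
  simp [PySem.List.slice]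

-- the label list is never empty
theorem pv_labels_ne_nil (fuel : Nat) (cs : List Char) : pvLabels fuel cs ≠ [] := by
  cases fuel with
  | zero => simp [pvLabels]
  | succ fuel =>
    simp only [pvLabels]
    rcases h : pvClassify (PySem.Chars.stripChars cs pvStripSet) with ⟨lab, o⟩
    cases o <;> simp

-- joining a label onto a nonempty tail
theorem pv_join_cons (a : String) (l : List String) (h : l ≠ []) :
    PySem.Str.join "_" (a :: l) = a ++ "_" ++ PySem.Str.join "_" l := by
  cases l with
  | nil => exact absurd rfl h
  | cons b t =>
    simp only [PySem.Str.join, List.map_cons]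
    rw [show ("_" : String).toList = ['_'] from rfl, PySem.Chars.join_cons_cons,
      String.ofList_append, String.ofList_append, String.ofList_toList]

-- THE MAIN LEMMA: joining the collected step labels equals A's recursion
theorem pv_main (fuel : Nat) (cs : List Char) :
    PySem.Str.join "_" (pvLabels fuel cs) = defineRowA fuel cs := by
  induction fuel generalizing cs with
  | zero => rfl
  | succ fuel ih =>
    simp only [defineRowA, pvLabels, pvClassify]
    set r := PySem.Chars.stripChars cs pvStripSet with hr
    by_cases h1 : r.length = 1
    · rw [if_pos h1, if_pos h1]; rfl
    rw [if_neg h1, if_neg h1]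
    by_cases h2 : 2 ≤ r.length ∧ PySem.List.pyGet? r 0 = some '/' ∧ PySem.List.pyGet? r 1 = some '/'
    · rw [if_pos h2, if_pos ((pv_startswith_pair r '/' '/').mpr h2)]; rfl
    rw [if_neg h2, if_neg (fun hb => h2 ((pv_startswith_pair r '/' '/').mp hb))]
    by_cases h3 : 2 ≤ r.length ∧ PySem.List.pyGet? r 0 = some '/' ∧ PySem.List.pyGet? r 1 = some '*'
    · rw [if_pos h3, if_pos ((pv_startswith_pair r '/' '*').mpr h3)]
      by_cases h3a : PySem.Chars.rfind r ['*','/'] = -1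
      · rw [if_pos h3a, if_pos h3a]; rfl
      rw [if_neg h3a, if_neg h3a]
      by_cases h3b : PySem.Chars.rfind r ['*','/'] = (r.length : Int) - 2
      · rw [if_pos h3b, if_pos h3b]; rfl
      rw [if_neg h3b, if_neg h3b]
      obtain ⟨i, hiv, hib⟩ := pv_rfind_bound r ['*','/'] (by simp) h3a
      have hlt : PySem.Chars.rfind r ['*','/'] < (r.length : Int) - 2 := by
        rw [hiv] at h3b ⊢
        simp only [List.length_cons, List.length_nil] at hib
        omega
      rw [if_pos hlt, pv_join_cons _ _ (pv_labels_ne_nil _ _), pv_slice_none, ih,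
        show ("Comment" ++ "_" : String) = "Comment_" from rfl]
    rw [if_neg h3, if_neg (fun hb => h3 ((pv_startswith_pair r '/' '*').mp hb))]
    by_cases hnil : r = []
    · have d1 : PySem.Chars.rfind ([] : List Char) [';'] = -1 := by decide
      have d2 : PySem.Chars.rfind ([] : List Char) ['/','*'] = -1 := by decide
      have d3 : PySem.Chars.count ([] : List Char) [';'] = 0 := by decide
      have d4 : PySem.Chars.endswith ([] : List Char) [';'] = false := by decide
      rw [hnil]
      norm_num [d1, d2, d3, d4]
      rfl
    have hlen1 : 1 ≤ r.length := List.length_pos_iff.mpr hnil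
    by_cases hend : PySem.Chars.endswith r [';'] = true
    · have hrf : PySem.Chars.rfind r [';'] = (r.length : Int) - 1 :=
        (pv_endswith_iff_rfind r ';' hnil).mp hend
      by_cases hc : PySem.Chars.count r [';'] = 1
      · have hA4 : PySem.Chars.rfind r [';'] = (r.length : Int) - 1 ∧
            PySem.Chars.count r [';'] = 1 := ⟨hrf, hc⟩
        rw [if_pos hend, if_pos hc, if_pos hA4]; rfl
      · have hmem : ';' ∈ r := by
          have hs : [';'] <:+ r :=
            List.isSuffixOf_iff_suffix.mp (by simpa [PySem.Chars.endswith] using hend)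
          exact hs.subset (by simp)
        have hcl : 1 < PySem.Chars.count r [';'] := by
          rw [pv_count_single] at hc ⊢
          have := List.count_pos_iff.mpr hmem
          omega
        have hn4 : ¬(PySem.Chars.rfind r [';'] = (r.length : Int) - 1 ∧
            PySem.Chars.count r [';'] = 1) := fun hb => hc hb.2
        have hA5 : PySem.Chars.rfind r [';'] = (r.length : Int) - 1 ∧
            1 < PySem.Chars.count r [';'] := ⟨hrf, hcl⟩
        rw [if_pos hend, if_neg hc, if_neg hn4, if_pos hA5,
          pv_join_cons _ _ (pv_labels_ne_nil _ _), pv_slice_none, ih,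
          show ("Code" ++ "_" : String) = "Code_" from rfl]
    · have hrf_ne : PySem.Chars.rfind r [';'] ≠ (r.length : Int) - 1 :=
        fun hb => hend ((pv_endswith_iff_rfind r ';' hnil).mpr hb)
      have hn4 : ¬(PySem.Chars.rfind r [';'] = (r.length : Int) - 1 ∧
          PySem.Chars.count r [';'] = 1) := fun hb => hrf_ne hb.1
      have hn5 : ¬(PySem.Chars.rfind r [';'] = (r.length : Int) - 1 ∧
          1 < PySem.Chars.count r [';']) := fun hb => hrf_ne hb.1
      by_cases hne : PySem.Chars.rfind r [';'] ≠ -1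
      · obtain ⟨i, hiv, hib⟩ := pv_rfind_bound r [';'] (by simp) hne
        have hlt : PySem.Chars.rfind r [';'] < (r.length : Int) - 1 := by
          rw [hiv] at hrf_ne ⊢
          simp only [List.length_cons, List.length_nil] at hib
          omega
        have hA6 : PySem.Chars.rfind r [';'] ≠ -1 ∧
            PySem.Chars.rfind r [';'] < (r.length : Int) - 1 := ⟨hne, hlt⟩
        rw [if_neg hend, if_pos hne, if_neg hn4, if_neg hn5, if_pos hA6,
          pv_join_cons _ _ (pv_labels_ne_nil _ _), pv_slice_none, ih,
          show ("Code" ++ "_" : String) = "Code_" from rfl]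
      · have heq : PySem.Chars.rfind r [';'] = -1 := by
          by_contra hx; exact hne hx
        have hnn : ¬(PySem.Chars.rfind r [';'] ≠ -1) := fun hb => hb heq
        have hn6 : ¬(PySem.Chars.rfind r [';'] ≠ -1 ∧
            PySem.Chars.rfind r [';'] < (r.length : Int) - 1) := fun hb => hb.1 heq
        rw [if_neg hend, if_neg hnn, if_neg hn4, if_neg hn5, if_neg hn6, if_pos heq]
        by_cases hj : PySem.Chars.rfind r ['/','*'] = -1
        · rw [if_pos hj, if_pos hj]; rfl
        · rw [if_neg hj, if_neg hj,
            pv_join_cons _ _ (pv_labels_ne_nil _ _), pv_slice_none, ih,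
            show ("Code" ++ "_" : String) = "Code_" from rfl]

-- ===== VERDICT (by name: the statement is the Claim_ definition above) =====
theorem define_row_spec : Claim_equal_define_row := by
  intro row _
  unfold Spec_define_row define_row define_row_alt
  rw [pv_main]
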